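-- pv_equiv track=rewrite | github.com/amanabate/A2SV-Solutions | 05-Nov-2025/Longest Nice Subarray 407589.py | longestNiceSubarray
-- ===== SOURCE A (Python) =====
-- from typing import List
--
-- def longestNiceSubarray(nums: List[int]) -> int:
--     left = 0
--     current_or = 0
--     max_len = 0
--
--     for right in range(len(nums)):
--         while current_or & nums[right] != 0:
--             current_or ^= nums[left]
--             left += 1
--
--         # Add nums[right] to current_or
--         current_or |= nums[right]
--
--         # Update max length
--         max_len = max(max_len, right - left + 1)
--
--     return max_len
-- ===== SOURCE B (Python) =====
-- from typing import List
--
-- def longestNiceSubarray(nums: List[int]) -> int: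
--     # For each right endpoint, rebuild the window by scanning backward while the
--     # next element is bit-disjoint from the OR accumulated so far.
--     best = 0
--     for right in range(len(nums)):
--         cur = nums[right]
--         length = 1
--         i = right - 1
--         while i >= 0 and (cur & nums[i]) == 0:
--             cur |= nums[i]
--             length += 1
--             i -= 1
--         best = max(best, length)
--     return best
-- ===== Notes on version B (the rewrite author's own statement) =====
-- stated objective: alternative
-- what changed: Replaces the forward two-pointer sliding window (with XOR-removal of the left element from a running OR) by an independent backward rescan per right endpoint that rebuilds the window OR from scratch and stops at the first conflicting element.
import Mathlib
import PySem

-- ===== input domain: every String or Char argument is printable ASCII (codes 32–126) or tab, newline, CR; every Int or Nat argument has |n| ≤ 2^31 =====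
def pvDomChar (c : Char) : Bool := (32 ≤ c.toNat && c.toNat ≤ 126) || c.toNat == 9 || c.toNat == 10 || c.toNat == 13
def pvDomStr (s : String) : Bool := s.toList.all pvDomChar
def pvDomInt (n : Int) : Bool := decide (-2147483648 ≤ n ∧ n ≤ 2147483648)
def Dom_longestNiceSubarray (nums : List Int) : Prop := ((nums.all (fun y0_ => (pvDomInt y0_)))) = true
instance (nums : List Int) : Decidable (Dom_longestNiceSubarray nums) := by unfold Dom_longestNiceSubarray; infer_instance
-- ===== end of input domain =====

-- B rebuilds each window by a backward rescan per right endpoint instead of A's forward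
-- two-pointer single pass; genuinely different traversal, similar practical cost (objective: alternative).
-- Int.land / Int.lor / Int.xor are exact Python & | ^ on all ints (infinite two's complement).

-- ===== PORT A =====
-- A's inner `while` loop. `fuel` only bounds the recursion: the loop always stops by the
-- time left = right (proved below in pvAWhile_spec), and `nums.getD left 0` is only ever
-- evaluated with left < nums.length, so it is exactly Python's nums[left] here.
def pvAWhile (nums : List Int) (x : Int) : Nat → Int → Nat → Int × Nat
  | 0, cur, left => (cur, left)
  | fuel+1, cur, left =>
    if Int.land cur x ≠ 0 then
      pvAWhile nums x fuel (Int.xor cur (nums.getD left 0)) (left + 1)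
    else (cur, left)

def longestNiceSubarray (nums : List Int) : Int :=
  ((List.range nums.length).foldl
    (fun (st : Nat × Int × Int) right =>
      let res := pvAWhile nums (nums.getD right 0) (nums.length + 1) st.2.1 st.1
      (res.2, Int.lor res.1 (nums.getD right 0), max st.2.2 ((right : Int) - (res.2 : Int) + 1)))
    (0, 0, 0)).2.2

-- ===== PORT B =====
-- B's inner backward while loop: scan i = right-1, right-2, … while cur & nums[i] == 0,
-- OR-ing nums[i] into cur; returns the number of elements absorbed.
def pvGrow (nums : List Int) : Nat → Int → Nat
  | 0, _ => 0
  | i+1, cur =>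
    if Int.land cur (nums.getD i 0) = 0 then pvGrow nums i (Int.lor cur (nums.getD i 0)) + 1
    else 0

def longestNiceSubarray_alt (nums : List Int) : Int :=
  (List.range nums.length).foldl
    (fun best right => max best ((pvGrow nums right (nums.getD right 0) + 1 : Nat) : Int)) 0

-- ===== PRECONDITION & SPEC =====
def Spec_longestNiceSubarray (nums : List Int) (out : Int) : Prop := out = longestNiceSubarray_alt nums
instance (nums : List Int) (out : Int) : Decidable (Spec_longestNiceSubarray nums out) := by unfold Spec_longestNiceSubarray; infer_instance

-- ===== CLAIM (what is proved, stated in full; the proofs are below) =====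
def Claim_equal_longestNiceSubarray : Prop := ∀ (nums : List Int), Dom_longestNiceSubarray nums → Spec_longestNiceSubarray nums (longestNiceSubarray nums)

-- ===== LEMMAS AND PROOFS =====

theorem int_ext {a b : Int} (h : ∀ k, a.testBit k = b.testBit k) : a = b := by
  cases a with
  | ofNat m =>
    cases b with
    | ofNat n =>
      have : m = n := Nat.eq_of_testBit_eq (fun k => by
        have := h k; simpa [Int.testBit] using this)
      simp [this]
    | negSucc n =>
      exfalso
      have hk := h (m + n)
      have h1 : Nat.testBit m (m + n) = false :=
        Nat.testBit_lt_two_pow (lt_of_lt_of_le (Nat.lt_two_pow_self) (Nat.pow_le_pow_right (by norm_num) (Nat.le_add_right _ _)))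
      have h2 : Nat.testBit n (m + n) = false :=
        Nat.testBit_lt_two_pow (lt_of_lt_of_le (Nat.lt_two_pow_self) (Nat.pow_le_pow_right (by norm_num) (Nat.le_add_left _ _)))
      simp [Int.testBit, h1, h2] at hk
  | negSucc m =>
    cases b with
    | ofNat n =>
      exfalso
      have hk := h (m + n)
      have h1 : Nat.testBit m (m + n) = false :=
        Nat.testBit_lt_two_pow (lt_of_lt_of_le (Nat.lt_two_pow_self) (Nat.pow_le_pow_right (by norm_num) (Nat.le_add_right _ _)))
      have h2 : Nat.testBit n (m + n) = false :=
        Nat.testBit_lt_two_pow (lt_of_lt_of_le (Nat.lt_two_pow_self) (Nat.pow_le_pow_right (by norm_num) (Nat.le_add_left _ _)))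
      simp [Int.testBit, h1, h2] at hk
    | negSucc n =>
      have : m = n := Nat.eq_of_testBit_eq (fun k => by
        have := h k; simp [Int.testBit] at this; exact this)
      simp [this]

theorem zero_testBit' (k : Nat) : (0 : Int).testBit k = false := by
  simp [Int.testBit]

theorem land_eq_zero_iff {a b : Int} :
    Int.land a b = 0 ↔ ∀ k, (a.testBit k && b.testBit k) = false := by
  constructor
  · intro h k
    have := congrArg (fun x => Int.testBit x k) h
    simpa [Int.testBit_land, zero_testBit'] using this
  · intro h
    exact int_ext (fun k => by simp [Int.testBit_land, h k, zero_testBit'])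

theorem land_comm' (a b : Int) : Int.land a b = Int.land b a :=
  int_ext (fun k => by simp [Int.testBit_land, Bool.and_comm])

theorem land_zero' (a : Int) : Int.land a 0 = 0 :=
  int_ext (fun k => by simp [Int.testBit_land, zero_testBit'])

theorem zero_land' (a : Int) : Int.land 0 a = 0 :=
  int_ext (fun k => by simp [Int.testBit_land, zero_testBit'])

theorem lor_zero' (a : Int) : Int.lor a 0 = a :=
  int_ext (fun k => by simp [Int.testBit_lor, zero_testBit'])

theorem zero_lor' (a : Int) : Int.lor 0 a = a :=
  int_ext (fun k => by simp [Int.testBit_lor, zero_testBit'])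

theorem lor_comm' (a b : Int) : Int.lor a b = Int.lor b a :=
  int_ext (fun k => by simp [Int.testBit_lor, Bool.or_comm])

theorem lor_assoc' (a b c : Int) : Int.lor (Int.lor a b) c = Int.lor a (Int.lor b c) :=
  int_ext (fun k => by simp [Int.testBit_lor, Bool.or_assoc])

theorem land_lor_right_zero_iff {a b c : Int} :
    Int.land a (Int.lor b c) = 0 ↔ Int.land a b = 0 ∧ Int.land a c = 0 := by
  simp only [land_eq_zero_iff, Int.testBit_lor]
  constructor
  · intro h
    constructor <;> intro k <;> have := h k <;>
      cases ha : a.testBit k <;> cases hb : b.testBit k <;> cases hc : c.testBit k <;>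
        simp_all
  · rintro ⟨h1, h2⟩ k
    have := h1 k; have := h2 k
    cases ha : a.testBit k <;> cases hb : b.testBit k <;> cases hc : c.testBit k <;> simp_all

theorem land_lor_left_zero_iff {a b c : Int} :
    Int.land (Int.lor a b) c = 0 ↔ Int.land a c = 0 ∧ Int.land b c = 0 := by
  rw [land_comm', land_lor_right_zero_iff, land_comm' c a, land_comm' c b]

theorem xor_lor_cancel {a r : Int} (h : Int.land a r = 0) :
    Int.xor (Int.lor a r) a = r := by
  rw [land_eq_zero_iff] at h
  refine int_ext (fun k => ?_)
  have := h k
  rw [Int.testBit_lxor, Int.testBit_lor]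
  cases ha : a.testBit k <;> cases hr : r.testBit k <;> simp_all

def aG (l : List Int) (i : Nat) : Int := l.getD i 0
def orS (l : List Int) : Nat → Nat → Int
  | _, 0 => 0
  | i, k+1 => Int.lor (aG l i) (orS l (i+1) k)
def Dj (l : List Int) : Nat → Nat → Prop
  | _, 0 => True
  | i, k+1 => Int.land (aG l i) (orS l (i+1) k) = 0 ∧ Dj l (i+1) k

theorem orS_back (l : List Int) (i k : Nat) :
    orS l i (k+1) = Int.lor (orS l i k) (aG l (i+k)) := by
  induction k generalizing i with
  | zero => simp [orS, lor_zero', zero_lor']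
  | succ k ih =>
    show Int.lor (aG l i) (orS l (i+1) (k+1)) = _
    rw [ih (i+1), ← lor_assoc']
    have : i + 1 + k = i + (k + 1) := by omega
    rw [this]
    rfl

theorem Dj_back (l : List Int) (i k : Nat) :
    Dj l i (k+1) ↔ Dj l i k ∧ Int.land (orS l i k) (aG l (i+k)) = 0 := by
  induction k generalizing i with
  | zero =>
    simp [Dj, orS, land_zero', zero_land']
  | succ k ih =>
    have e1 : i + 1 + k = i + (k + 1) := by omega
    constructor
    · rintro ⟨h1, h2⟩
      rw [ih _] at h2
      rw [orS_back, land_lor_right_zero_iff, e1] at h1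
      refine ⟨⟨h1.1, h2.1⟩, ?_⟩
      show Int.land (Int.lor (aG l i) (orS l (i+1) k)) (aG l (i + (k+1))) = 0
      rw [land_lor_left_zero_iff]
      exact ⟨h1.2, e1 ▸ h2.2⟩
    · rintro ⟨⟨h1, h2⟩, h3⟩
      have h3' : Int.land (Int.lor (aG l i) (orS l (i+1) k)) (aG l (i + (k+1))) = 0 := h3
      rw [land_lor_left_zero_iff] at h3'
      refine ⟨?_, (ih _).mpr ⟨h2, e1 ▸ h3'.2⟩⟩
      rw [orS_back, land_lor_right_zero_iff, e1]
      exact ⟨h1, h3'.1⟩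

theorem Dj_suffix (l : List Int) (d i k : Nat) (h : Dj l i k) : Dj l (i+d) (k-d) := by
  induction d generalizing i k with
  | zero => simpa using h
  | succ d ih =>
    cases k with
    | zero => simpa using trivial
    | succ k =>
      have := ih (i+1) k h.2
      have e : i + 1 + d = i + (d + 1) := by omega
      have e2 : k - d = k + 1 - (d + 1) := by omega
      rwa [e, e2] at this

theorem orS_remove (l : List Int) (i k : Nat) (h : Dj l i (k+1)) :
    Int.xor (orS l i (k+1)) (aG l i) = orS l (i+1) k := by
  show Int.xor (Int.lor (aG l i) (orS l (i+1) k)) (aG l i) = _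
  exact xor_lor_cancel h.1


theorem grow_spec (l : List Int) (i : Nat) :
    ∀ k, Dj l i k →
      pvGrow l i (orS l i k) ≤ i ∧
      Dj l (i - pvGrow l i (orS l i k)) (k + pvGrow l i (orS l i k)) ∧
      (i - pvGrow l i (orS l i k) = 0 ∨
        Int.land (aG l (i - pvGrow l i (orS l i k) - 1))
          (orS l (i - pvGrow l i (orS l i k)) (k + pvGrow l i (orS l i k))) ≠ 0) := by
  induction i with
  | zero =>
    intro k hD
    simp [pvGrow]
    exact hD
  | succ i ih =>
    intro k hD
    by_cases hc : Int.land (orS l (i+1) k) (l.getD i 0) = 0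
    · have hcur : Int.lor (orS l (i+1) k) (l.getD i 0) = orS l i (k+1) := by
        show _ = Int.lor (aG l i) (orS l (i+1) k)
        rw [lor_comm']; rfl
      have hg : pvGrow l (i+1) (orS l (i+1) k) = pvGrow l i (orS l i (k+1)) + 1 := by
        simp only [pvGrow]
        rw [if_pos hc, hcur]
      have hD' : Dj l i (k+1) := ⟨by rw [land_comm'] at hc; exact hc, hD⟩
      obtain ⟨h1, h2, h3⟩ := ih (k+1) hD'
      rw [hg]
      have e1 : i + 1 - (pvGrow l i (orS l i (k+1)) + 1) = i - pvGrow l i (orS l i (k+1)) := by omega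
      have e2 : k + (pvGrow l i (orS l i (k+1)) + 1) = (k+1) + pvGrow l i (orS l i (k+1)) := by omega
      rw [e1, e2]
      exact ⟨by omega, h2, h3⟩
    · have hg : pvGrow l (i+1) (orS l (i+1) k) = 0 := by
        simp only [pvGrow]
        rw [if_neg hc]
      rw [hg]
      refine ⟨by omega, by simpa using hD, Or.inr ?_⟩
      simp only [Nat.add_zero, Nat.sub_zero, Nat.add_sub_cancel]
      rw [land_comm'] at hc
      exact hc

theorem stop_minimal (l : List Int) (e s g : Nat) (hse : s ≤ e) (hge : g ≤ e)
    (hg : Dj l g (e - g)) (hs : Dj l s (e - s))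
    (hstop : s = 0 ∨ Int.land (aG l (s-1)) (orS l s (e - s)) ≠ 0) : s ≤ g := by
  by_contra hlt
  push_neg at hlt
  have hs1 : 1 ≤ s := by omega
  rcases hstop with h0 | hconf
  · omega
  · have hsfx := Dj_suffix l (s - 1 - g) g (e - g) hg
    have e1 : g + (s - 1 - g) = s - 1 := by omega
    have e2 : e - g - (s - 1 - g) = (e - s) + 1 := by omega
    rw [e1, e2] at hsfx
    have : Int.land (aG l (s-1)) (orS l ((s-1)+1) (e - s)) = 0 := hsfx.1
    have e3 : s - 1 + 1 = s := by omega
    rw [e3] at this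
    exact hconf this


theorem pvAWhile_spec (l : List Int) (r : Nat) :
    ∀ k left fuel, left + k = r → Dj l left k → k < fuel →
      ∃ s, pvAWhile l (aG l r) fuel (orS l left k) left = (orS l s (r - s), s) ∧
        left ≤ s ∧ s ≤ r ∧ Dj l s (r - s) ∧
        Int.land (orS l s (r - s)) (aG l r) = 0 ∧
        (∀ t, left ≤ t → t < s → Int.land (orS l t (r - t)) (aG l r) ≠ 0) := by
  intro k
  induction k with
  | zero =>
    intro left fuel he hD hf
    obtain ⟨f, rfl⟩ : ∃ f, fuel = f + 1 := ⟨fuel - 1, by omega⟩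
    refine ⟨left, ?_, le_refl _, by omega, ?_, ?_, ?_⟩
    · simp only [pvAWhile]
      rw [if_neg (by simp [orS, zero_land'])]
      have : r - left = 0 := by omega
      rw [this]
    · have : r - left = 0 := by omega
      rw [this]; exact hD
    · have : r - left = 0 := by omega
      rw [this]; simp [orS, zero_land']
    · intro t h1 h2; omega
  | succ k ih =>
    intro left fuel he hD hf
    obtain ⟨f, rfl⟩ : ∃ f, fuel = f + 1 := ⟨fuel - 1, by omega⟩
    by_cases hc : Int.land (orS l left (k+1)) (aG l r) ≠ 0
    · have hstep : pvAWhile l (aG l r) (f+1) (orS l left (k+1)) left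
          = pvAWhile l (aG l r) f (orS l (left+1) k) (left+1) := by
        simp only [pvAWhile]
        rw [if_pos hc]
        have : Int.xor (orS l left (k+1)) (l.getD left 0) = orS l (left+1) k :=
          orS_remove l left k hD
        rw [this]
      obtain ⟨s, hres, h1, h2, h3, h4, h5⟩ := ih (left+1) f (by omega) hD.2 (by omega)
      refine ⟨s, by rw [hstep]; exact hres, by omega, h2, h3, h4, ?_⟩
      intro t ht1 ht2
      rcases Nat.eq_or_lt_of_le ht1 with h | hlt
      · subst h
        have : r - left = k + 1 := by omega
        rw [this]; exact hc
      · exact h5 t (by omega) ht2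
    · push_neg at hc
      refine ⟨left, ?_, le_refl _, by omega, ?_, ?_, ?_⟩
      · simp only [pvAWhile]
        rw [if_neg (by simpa using hc)]
        have : r - left = k + 1 := by omega
        rw [this]
      · have : r - left = k + 1 := by omega
        rw [this]; exact hD
      · have : r - left = k + 1 := by omega
        rw [this]; exact hc
      · intro t h1 h2; omega

def gLen (l : List Int) (r : Nat) : Nat := pvGrow l r (l.getD r 0) + 1
def gStart (l : List Int) (r : Nat) : Nat := r + 1 - gLen l r

theorem gStart_spec (l : List Int) (r : Nat) :
    gStart l r ≤ r ∧ Dj l (gStart l r) (r + 1 - gStart l r) ∧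
      (gStart l r = 0 ∨
        Int.land (aG l (gStart l r - 1)) (orS l (gStart l r) (r + 1 - gStart l r)) ≠ 0) := by
  have hD1 : Dj l r 1 := ⟨by simp [orS, land_zero'], trivial⟩
  have hcur : orS l r 1 = l.getD r 0 := by simp [orS, aG, lor_zero']
  obtain ⟨h1, h2, h3⟩ := grow_spec l r 1 hD1
  rw [hcur] at h1 h2 h3
  have hg : gStart l r = r - pvGrow l r (l.getD r 0) := by unfold gStart gLen; omega
  have he : r + 1 - gStart l r = 1 + pvGrow l r (l.getD r 0) := by unfold gStart gLen; omega
  rw [he, hg]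
  exact ⟨by omega, h2, h3⟩

def gs (l : List Int) : Nat → Nat
  | 0 => 0
  | r+1 => gStart l r

theorem gs_props (l : List Int) (r : Nat) :
    gs l r ≤ r ∧ Dj l (gs l r) (r - gs l r) ∧
      (gs l r = 0 ∨ Int.land (aG l (gs l r - 1)) (orS l (gs l r) (r - gs l r)) ≠ 0) := by
  cases r with
  | zero => exact ⟨le_refl _, trivial, Or.inl rfl⟩
  | succ r =>
    obtain ⟨h1, h2, h3⟩ := gStart_spec l r
    simp only [gs]
    exact ⟨by omega, h2, h3⟩

theorem invariant (l : List Int) (r : Nat) (hr : r ≤ l.length) :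
    (List.range r).foldl
      (fun (st : Nat × Int × Int) right =>
        let res := pvAWhile l (l.getD right 0) (l.length + 1) st.2.1 st.1
        (res.2, Int.lor res.1 (l.getD right 0), max st.2.2 ((right : Int) - (res.2 : Int) + 1)))
      (0, 0, 0)
    = (gs l r, orS l (gs l r) (r - gs l r),
       (List.range r).foldl
         (fun best right => max best ((pvGrow l right (l.getD right 0) + 1 : Nat) : Int)) 0) := by
  induction r with
  | zero => simp [gs, orS]
  | succ r ih =>
    rw [List.range_succ, List.foldl_append, List.foldl_append, ih (by omega)]
    simp only [List.foldl_cons, List.foldl_nil]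
    -- one step of A's fold from the invariant state
    obtain ⟨hL, hDL, hstopL⟩ := gs_props l r
    obtain ⟨s, hres, hls, hsr, hDs, hzero, hfirst⟩ :=
      pvAWhile_spec l r (r - gs l r) (gs l r) (l.length + 1) (by omega) hDL (by omega)
    obtain ⟨hg1, hg2, hg3⟩ := gStart_spec l r
    have e0 : r + 1 - gStart l r = (r - gStart l r) + 1 := by omega
    have hgback := (Dj_back l (gStart l r) (r - gStart l r)).mp (by rw [← e0]; exact hg2)
    have hDg : Dj l (gStart l r) (r - gStart l r) := hgback.1
    have hgz : Int.land (orS l (gStart l r) (r - gStart l r)) (aG l r) = 0 := by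
      have := hgback.2
      have e : gStart l r + (r - gStart l r) = r := by omega
      rwa [e] at this
    have hLg : gs l r ≤ gStart l r :=
      stop_minimal l r (gs l r) (gStart l r) hL hg1 hDg hDL hstopL
    have hsg : s ≤ gStart l r := by
      by_contra hlt
      exact hfirst (gStart l r) hLg (by omega) hgz
    have hDs' : Dj l s (r + 1 - s) := by
      have e : r + 1 - s = (r - s) + 1 := by omega
      rw [e]
      refine (Dj_back l s (r - s)).mpr ⟨hDs, ?_⟩
      have e2 : s + (r - s) = r := by omega
      rw [e2]; exact hzero
    have hgs : gStart l r ≤ s :=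
      stop_minimal l (r+1) (gStart l r) s (by omega) (by omega) hDs' hg2 hg3
    have hseq : s = gStart l r := by omega
    have hres' : pvAWhile l (l.getD r 0) (l.length + 1) (orS l (gs l r) (r - gs l r)) (gs l r)
        = (orS l s (r - s), s) := hres
    rw [hres']
    have hor : Int.lor (orS l s (r - s)) (l.getD r 0) = orS l (gStart l r) (r + 1 - gStart l r) := by
      rw [hseq] at *
      rw [e0, orS_back]
      have e2 : gStart l r + (r - gStart l r) = r := by omega
      rw [e2]; rfl
    have hmax : ((r : Int) - (s : Int) + 1) = ((pvGrow l r (l.getD r 0) + 1 : Nat) : Int) := by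
      have h1 : pvGrow l r (l.getD r 0) ≤ r := by
        have hD1 : Dj l r 1 := ⟨by simp [orS, land_zero'], trivial⟩
        have hcur1 : orS l r 1 = l.getD r 0 := by simp [orS, aG, lor_zero']
        have h1' := (grow_spec l r 1 hD1).1
        rwa [hcur1] at h1'
      have h2 : s = r - pvGrow l r (l.getD r 0) := by
        rw [hseq]; unfold gStart gLen; omega
      rw [h2]
      push_cast [h1]
      omega
    rw [hor, hmax]
    show _ = (gs l (r+1), orS l (gs l (r+1)) (r + 1 - gs l (r+1)), _)
    simp only [gs]
    rw [hseq]

-- ===== VERDICT (by name: the statement is the Claim_ definition above) =====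
theorem longestNiceSubarray_spec : Claim_equal_longestNiceSubarray := by
  intro nums _
  unfold Spec_longestNiceSubarray longestNiceSubarray longestNiceSubarray_alt
  rw [invariant nums nums.length (le_refl _)]
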